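-- pv_equiv track=rewrite | github.com/sarathbapu/python-training-codes | EasyProblems/StudentAverage.py | get_student_average
-- ===== SOURCE A (Python) =====
-- def get_student_average(student_marks: list):
--     """
--     Given array of students and their marks in different subjects.
--     Find maximum average of the student in the following format below.
--     Use Math.floor() to convert fractional average to integer.
--     """
--
--     container = {} # For each student stored in format student_name : [total_marks, no of marks]
--
--     for stu_mark in student_marks:
--         stu_name, mark = stu_mark[0], int(stu_mark[1])
--         if stu_name in container.keys():
--             existing_details = container[stu_name]
--             container[stu_name] = [ existing_details[0] + mark, existing_details[1] + 1 ]
--         else :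
--             container[stu_name] = [mark, 1]
--
--     max_avg = 0
--     for stu in container.keys():
--         details = container[stu]
--         avg = details[0] // details[1]
--         max_avg = avg if avg > max_avg else max_avg
--
--     return max_avg
-- ===== SOURCE B (Python) =====
-- def get_student_average(student_marks: list):
--     best = 0
--     pairs = list(student_marks)
--     while pairs:
--         name = pairs[0][0]
--         total = 0
--         count = 0
--         rest = []
--         for n, m in pairs:
--             if n == name:
--                 total += int(m)
--                 count += 1
--             else:
--                 rest.append((n, m))
--         best = max(best, total // count)
--         pairs = rest
--     return best
-- ===== Notes on version B (the rewrite author's own statement) =====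
-- stated objective: alternative
-- what changed: Replaced the dict of running [total,count] plus a second pass over its keys by a dict-free repeated partition: each round takes the first remaining student's name, sums and counts that name's marks while filtering the rest, and folds the floored average into the running max.
import Mathlib
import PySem

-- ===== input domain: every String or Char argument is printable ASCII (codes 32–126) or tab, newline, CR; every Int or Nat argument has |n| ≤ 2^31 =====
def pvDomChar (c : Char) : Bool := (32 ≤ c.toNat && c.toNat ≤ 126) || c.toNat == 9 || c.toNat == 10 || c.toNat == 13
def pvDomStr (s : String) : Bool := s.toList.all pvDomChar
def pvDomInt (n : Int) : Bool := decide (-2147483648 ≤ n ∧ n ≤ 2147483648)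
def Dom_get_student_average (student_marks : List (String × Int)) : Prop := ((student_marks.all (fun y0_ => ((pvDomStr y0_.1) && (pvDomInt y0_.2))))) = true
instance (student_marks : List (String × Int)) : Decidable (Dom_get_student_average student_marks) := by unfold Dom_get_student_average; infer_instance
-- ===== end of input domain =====

-- B replaces A's dict accumulation with a dict-free repeated partition by the first remaining name (alternative algorithm, similar cost); return values agree on all inputs.

-- ===== PORT A =====
def get_student_average (student_marks : List (String × Int)) : Int :=
  let container : PySem.Dict String (Int × Int) :=
    student_marks.foldl (fun container stu_mark =>
      let stu_name := stu_mark.1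
      let mark := stu_mark.2          -- int(mark): mark is already an Int
      if container.contains stu_name then
        let existing_details := container.getD stu_name (0, 0)  -- container[stu_name]; key present, so getD is exact
        container.insert stu_name (existing_details.1 + mark, existing_details.2 + 1)
      else
        container.insert stu_name (mark, 1)) PySem.Dict.empty
  container.keys.foldl (fun max_avg stu =>
    let details := container.getD stu (0, 0)   -- container[stu]; stu ∈ keys, so getD is exact
    let avg := PySem.Int.floordiv details.1 details.2
    if avg > max_avg then avg else max_avg) 0

-- ===== PORT B =====
-- the inner for-loop of Source B: one fold maintaining (total, count, rest)
def gsaStep (name : String) (acc : Int × Int × List (String × Int)) (q : String × Int) : Int × Int × List (String × Int) :=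
  if q.1 == name then (acc.1 + q.2, acc.2.1 + 1, acc.2.2) else (acc.1, acc.2.1, acc.2.2 ++ [q])

theorem gsaStep_third (name : String) : ∀ (l : List (String × Int)) (t c : Int) (r : List (String × Int)),
    (l.foldl (gsaStep name) (t, c, r)).2.2 = r ++ l.filter (fun q => ¬ (q.1 == name))
  | [], t, c, r => by simp
  | q :: l, t, c, r => by
    by_cases h : q.1 = name
    · simp [gsaStep, h, gsaStep_third name l]
    · simp [gsaStep, h, gsaStep_third name l]

-- the while-loop of Source B
def gsaGo : List (String × Int) → Int → Int
  | [], best => best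
  | p :: ps, best =>
    let name := p.1
    let r := (p :: ps).foldl (gsaStep name) ((0 : Int), (0 : Int), ([] : List (String × Int)))
    gsaGo r.2.2 (max best (PySem.Int.floordiv r.1 r.2.1))
termination_by l _ => l.length
decreasing_by
  simp only [gsaStep_third]
  simp only [List.filter_cons, beq_self_eq_true, not_true, decide_false]
  exact Nat.lt_succ_of_le (by simpa using List.length_filter_le _ ps)

def get_student_average_alt (student_marks : List (String × Int)) : Int :=
  gsaGo student_marks 0

-- ===== PRECONDITION & SPEC =====
def Spec_get_student_average (student_marks : List (String × Int)) (out : Int) : Prop := out = get_student_average_alt student_marks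
instance (student_marks : List (String × Int)) (out : Int) : Decidable (Spec_get_student_average student_marks out) := by unfold Spec_get_student_average; infer_instance

-- ===== CLAIM (what is proved, stated in full; the proofs are below) =====
def Claim_equal_get_student_average : Prop := ∀ (student_marks : List (String × Int)), Dom_get_student_average student_marks → Spec_get_student_average student_marks (get_student_average student_marks)

-- ===== LEMMAS AND PROOFS =====

-- marks of student k in l, as A's (total, count)
def gsaStat (l : List (String × Int)) (k : String) : Int × Int :=
  (((l.filter (fun q => q.1 == k)).map (·.2)).sum, ((l.filter (fun q => q.1 == k)).length : Int))

def gsaAvg (l : List (String × Int)) (k : String) : Int :=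
  PySem.Int.floordiv (gsaStat l k).1 (gsaStat l k).2

theorem gsaStep_first_second (name : String) : ∀ (l : List (String × Int)) (t c : Int) (r : List (String × Int)),
    (l.foldl (gsaStep name) (t, c, r)).1 = t + (gsaStat l name).1 ∧
    (l.foldl (gsaStep name) (t, c, r)).2.1 = c + (gsaStat l name).2
  | [], t, c, r => by simp [gsaStat]
  | q :: l, t, c, r => by
    by_cases h : q.1 = name
    · have := gsaStep_first_second name l (t + q.2) (c + 1) r
      simp only [gsaStat, List.filter_cons, h, beq_self_eq_true] at this ⊢
      refine ⟨?_, ?_⟩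
      · rw [List.foldl_cons, gsaStep, if_pos (by simp [h]), this.1]; simp [List.sum_cons]; ring
      · rw [List.foldl_cons, gsaStep, if_pos (by simp [h]), this.2]; simp [List.length_cons]; ring
    · have := gsaStep_first_second name l t c (r ++ [q])
      simp only [gsaStat, List.filter_cons] at this ⊢
      refine ⟨?_, ?_⟩
      · rw [List.foldl_cons, gsaStep, if_neg (by simp [h]), this.1]; simp [h]
      · rw [List.foldl_cons, gsaStep, if_neg (by simp [h]), this.2]; simp [h]

-- A's dict-loop body, written as a single insert
def gsaUStep (d : PySem.Dict String (Int × Int)) (p : String × Int) : PySem.Dict String (Int × Int) :=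
  d.insert p.1 ((d.getD p.1 (0, 0)).1 + p.2, (d.getD p.1 (0, 0)).2 + 1)

theorem gsaAStep_eq : (fun (container : PySem.Dict String (Int × Int)) (stu_mark : String × Int) =>
      let stu_name := stu_mark.1
      let mark := stu_mark.2
      if container.contains stu_name then
        let existing_details := container.getD stu_name (0, 0)
        container.insert stu_name (existing_details.1 + mark, existing_details.2 + 1)
      else
        container.insert stu_name (mark, 1)) = gsaUStep := by
  funext d p
  by_cases h : d.contains p.1
  · simp [h, gsaUStep]
  · have hg := PySem.Dict.getD_of_not_contains d (k := p.1) (0, 0) (by simpa using h)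
    simp only [h, Bool.false_eq_true, if_false, gsaUStep, hg]
    norm_num

theorem gsaUStep_getD : ∀ (l : List (String × Int)) (d : PySem.Dict String (Int × Int)) (k : String),
    (l.foldl gsaUStep d).getD k (0, 0) =
      ((d.getD k (0, 0)).1 + (gsaStat l k).1, (d.getD k (0, 0)).2 + (gsaStat l k).2)
  | [], d, k => by simp [gsaStat]
  | p :: l, d, k => by
    rw [List.foldl_cons, gsaUStep_getD l _ k]
    by_cases h : k = p.1
    · subst h
      simp only [gsaUStep, gsaStat, List.filter_cons, beq_self_eq_true, if_true,
        List.map_cons, List.sum_cons, List.length_cons,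
        PySem.Dict.getD_insert, Prod.mk.injEq]
      constructor <;> push_cast <;> ring
    · simp only [gsaUStep, gsaStat, List.filter_cons,
        PySem.Dict.getD_insert, if_neg h]
      have : (p.1 == k) = false := by simpa using fun e => h e.symm
      simp [this]

theorem gsaUStep_keys (l : List (String × Int)) :
    (l.foldl gsaUStep PySem.Dict.empty).keys = PySem.Set.ofList (l.map (·.1)) := by
  rw [show gsaUStep = (fun (d : PySem.Dict String (Int × Int)) (p : String × Int) =>
        d.insert p.1 ((d.getD p.1 (0, 0)).1 + p.2, (d.getD p.1 (0, 0)).2 + 1)) from rfl]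
  rw [PySem.Dict.keys_foldl_insert_key]
  simp [PySem.Set.update_nil_left]

theorem gsaMax_if (m a : Int) : (if a > m then a else m) = max m a := by
  rw [max_def]; split_ifs <;> omega

-- A computes: fold max over the distinct names of the averages
theorem gsaA_eq (l : List (String × Int)) :
    get_student_average l =
      (PySem.Set.ofList (l.map (·.1))).foldl (fun m k => max m (gsaAvg l k)) 0 := by
  simp only [get_student_average, gsaAStep_eq, gsaUStep_keys]
  apply PySem.List.foldl_congr_mem
  intro acc k _
  rw [gsaUStep_getD]
  simp [gsaAvg, gsaMax_if]

theorem gsa_filt (name k : String) (hk : k ≠ name) : ∀ (l : List (String × Int)),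
    (l.filter (fun q => ¬ (q.1 == name))).filter (fun q => q.1 == k) = l.filter (fun q => q.1 == k)
  | [] => by simp
  | p :: l => by
    by_cases hp : p.1 = name
    · have h1 : (decide ¬((p.1 == name) = true)) = false := by simp [hp]
      have h2 : (p.1 == k) = false := by
        simp only [beq_eq_false_iff_ne, ne_eq, hp]
        exact fun e => hk e.symm
      simp only [List.filter_cons, h1, h2, Bool.false_eq_true, if_false, gsa_filt name k hk l]
    · have h1 : (decide ¬((p.1 == name) = true)) = true := by simp [hp]
      simp only [List.filter_cons, h1, if_true, gsa_filt name k hk l]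

theorem gsa_rest_avg (l : List (String × Int)) (name k : String) (hk : k ≠ name) :
    gsaStat (l.filter (fun q => ¬ (q.1 == name))) k = gsaStat l k := by
  unfold gsaStat
  rw [gsa_filt name k hk l]

theorem gsa_perm (p : String × Int) (ps : List (String × Int)) :
    (p.1 :: PySem.Set.ofList (((p :: ps).filter (fun q => ¬ (q.1 == p.1))).map (·.1))).Perm
      (PySem.Set.ofList ((p :: ps).map (·.1))) := by
  apply (List.perm_ext_iff_of_nodup _ (PySem.Set.nodup_ofList _)).2
  · intro x
    simp only [List.mem_cons, PySem.Set.mem_ofList, List.mem_map, List.mem_filter]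
    constructor
    · rintro (rfl | ⟨q, ⟨hq, hne⟩, rfl⟩)
      · exact ⟨p, Or.inl rfl, rfl⟩
      · exact ⟨q, hq, rfl⟩
    · rintro ⟨q, hq, rfl⟩
      by_cases h : q.1 = p.1
      · exact Or.inl h
      · exact Or.inr ⟨q, ⟨hq, by simpa using h⟩, rfl⟩
  · refine List.Nodup.cons ?_ (PySem.Set.nodup_ofList _)
    simp only [PySem.Set.mem_ofList, List.mem_map, List.mem_filter]
    rintro ⟨q, ⟨_, hne⟩, heq⟩
    simp only [decide_eq_true_eq] at hne
    exact hne (by simp [heq])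

-- B's while-loop computes the same fold
theorem gsaGo_eq : ∀ (n : Nat) (l : List (String × Int)) (b : Int), l.length ≤ n →
    gsaGo l b = (PySem.Set.ofList (l.map (·.1))).foldl (fun m k => max m (gsaAvg l k)) b
  | _, [], b, _ => by simp [gsaGo]
  | 0, p :: ps, b, h => by simp at h
  | n + 1, p :: ps, b, h => by
    rw [gsaGo]
    have h3 := gsaStep_third p.1 (p :: ps) 0 0 []
    have h12 := gsaStep_first_second p.1 (p :: ps) 0 0 []
    set l := p :: ps with hl
    set rest := l.filter (fun q => ¬ (q.1 == p.1)) with hrest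
    have hlen : rest.length ≤ n := by
      have : rest.length < l.length := by
        rw [hrest, hl, List.filter_cons]
        simp only [beq_self_eq_true, not_true, decide_false, Bool.false_eq_true, if_false]
        exact Nat.lt_succ_of_le (by simpa using List.length_filter_le _ ps)
      omega
    rw [show (l.foldl (gsaStep p.1) ((0:Int),(0:Int),([]:List (String × Int)))).2.2 = rest by
          rw [h3]; simp [hrest]]
    rw [show PySem.Int.floordiv (l.foldl (gsaStep p.1) ((0:Int),(0:Int),([]:List (String × Int)))).1
            (l.foldl (gsaStep p.1) ((0:Int),(0:Int),([]:List (String × Int)))).2.1 = gsaAvg l p.1 by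
          rw [h12.1, h12.2]; simp [gsaAvg]]
    rw [gsaGo_eq n rest _ hlen]
    rw [PySem.List.foldl_congr_mem _ _ (fun m k => max m (gsaAvg l k)) _ ?_]
    · have := (gsa_perm p ps).foldl_eq (f := fun m k => max m (gsaAvg l k))
        (rcomm := ⟨fun m a a' => max_right_comm m (gsaAvg l a) (gsaAvg l a')⟩) b
      rw [← this, List.foldl_cons]
    · intro acc k hk
      have hkne : k ≠ p.1 := by
        rw [hrest] at hk
        simp only [PySem.Set.mem_ofList, List.mem_map, List.mem_filter] at hk
        obtain ⟨q, ⟨_, hne⟩, rfl⟩ := hk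
        simpa using hne
      rw [hrest]
      unfold gsaAvg
      rw [gsa_rest_avg l p.1 k hkne]

-- ===== VERDICT (by name: the statement is the Claim_ definition above) =====
theorem get_student_average_spec : Claim_equal_get_student_average := by
  intro l _
  unfold Spec_get_student_average get_student_average_alt
  rw [gsaA_eq, gsaGo_eq l.length l 0 le_rfl]
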